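-- pv_equiv track=rewrite | github.com/UngSangYoon/Algorithm_Study_FISA | 박혁준/조합순열/베라의패션_브론즈4.py | solution
-- ===== SOURCE A (Python) =====
-- from itertools import product
--
-- def solution(n):
--     l1 = []
--     for i in range(1,n+1):
--         l1.append(i)
--     cnt = 0
--     for i in product(l1, repeat=2):
--         if len(set(i)) == 2:
--             cnt+=1
--     return cnt
-- ===== SOURCE B (Python) =====
-- def solution(n):
--     m = n if n > 0 else 0
--     return m * (m - 1)
-- ===== Notes on version B (the rewrite author's own statement) =====
-- stated objective: faster
-- what changed: Replaces building the list 1..n and scanning all n^2 ordered pairs for distinctness with the closed form m*(m-1) where m = max(n,0).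
import Mathlib
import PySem

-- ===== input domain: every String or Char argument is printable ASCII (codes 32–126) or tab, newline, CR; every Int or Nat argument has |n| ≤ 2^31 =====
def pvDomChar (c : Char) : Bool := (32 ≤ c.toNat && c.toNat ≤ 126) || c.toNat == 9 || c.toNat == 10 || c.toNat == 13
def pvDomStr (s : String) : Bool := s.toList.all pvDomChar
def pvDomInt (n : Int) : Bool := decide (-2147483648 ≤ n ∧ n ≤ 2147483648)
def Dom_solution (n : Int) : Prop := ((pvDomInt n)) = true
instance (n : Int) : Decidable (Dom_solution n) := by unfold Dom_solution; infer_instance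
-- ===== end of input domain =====

-- B replaces A's O(n^2) scan over all ordered pairs by the closed form m*(m-1), m = max(n,0).

-- ===== PORT A =====
def solution (n : Int) : Int :=
  -- l1 = [1, …, n] built by the range loop
  let l1 : List Int := PySem.List.pyRange 1 (n + 1) 1
  -- for i in product(l1, repeat=2): if len(set(i)) == 2: cnt += 1
  (l1.flatMap (fun i => l1.map (fun j => (i, j)))).foldl
    (fun cnt p => if (PySem.Set.ofList [p.1, p.2]).length == 2 then cnt + 1 else cnt) 0

-- ===== PORT B =====
def solution_alt (n : Int) : Int :=
  let m : Int := if n > 0 then n else 0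
  m * (m - 1)

-- ===== PRECONDITION & SPEC =====
def Spec_solution (n : Int) (out : Int) : Prop := out = solution_alt n
instance (n : Int) (out : Int) : Decidable (Spec_solution n out) := by unfold Spec_solution; infer_instance

-- ===== CLAIM (what is proved, stated in full; the proofs are below) =====
def Claim_equal_solution : Prop := ∀ (n : Int), Dom_solution n → Spec_solution n (solution n)

-- ===== LEMMAS AND PROOFS =====

theorem pv_set_pair_len (a b : Int) :
    ((PySem.Set.ofList [a, b]).length == 2) = (decide (a ≠ b)) := by
  by_cases h : a = b <;>
    simp [PySem.Set.ofList, PySem.Set.add, PySem.Set.contains, PySem.Set.empty, h, eq_comm]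

theorem pv_foldl_count (L : List (Int × Int)) (c : Int) :
    L.foldl (fun cnt p => if (PySem.Set.ofList [p.1, p.2]).length == 2 then cnt + 1 else cnt) c
      = c + (L.countP (fun p => decide (p.1 ≠ p.2)) : Int) := by
  induction L generalizing c with
  | nil => simp
  | cons p t ih =>
    rw [List.foldl_cons, ih, List.countP_cons, pv_set_pair_len]
    by_cases h : p.1 = p.2 <;> simp [h] <;> ring

theorem pv_countP_flatMap {α β : Type} (l : List α) (f : α → List β) (p : β → Bool) :
    (l.flatMap f).countP p = (l.map (fun i => (f i).countP p)).sum := by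
  induction l with
  | nil => simp
  | cons a t ih => simp [List.flatMap_cons, List.countP_append, ih]

theorem pv_count_row (l : List Int) (i : Int) (hnd : l.Nodup) (hi : i ∈ l) :
    (l.map (fun j => (i, j))).countP (fun p => decide (p.1 ≠ p.2)) = l.length - 1 := by
  rw [List.countP_map]
  have h1 : l.countP (fun j => j == i) = 1 := by
    simpa [List.count] using List.count_eq_one_of_mem hnd hi
  have h2 := List.length_eq_countP_add_countP (l := l) (p := fun j => j == i)
  have h3 : l.countP ((fun p : Int × Int => decide (p.1 ≠ p.2)) ∘ fun j => (i, j))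
      = l.countP (fun j => decide (¬ (j == i) = true)) := by
    apply List.countP_congr; intro x _
    by_cases h : i = x
    · subst h; simp [Function.comp]
    · have h' : x ≠ i := fun hx => h hx.symm
      simp [Function.comp, h, h']
  rw [h3]
  omega

theorem pv_solution_closed (n : Int) :
    solution n = ((PySem.List.pyRange 1 (n + 1) 1).length : Int)
      * (((PySem.List.pyRange 1 (n + 1) 1).length : Int) - 1) := by
  unfold solution
  set l := PySem.List.pyRange 1 (n + 1) 1 with hl
  rw [pv_foldl_count, pv_countP_flatMap]
  have hrow : l.map (fun i => (l.map (fun j => (i, j))).countP (fun p => decide (p.1 ≠ p.2)))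
      = l.map (fun _ => l.length - 1) := by
    apply List.map_congr_left
    intro i hi
    exact pv_count_row l i (hl ▸ PySem.List.nodup_pyRange_one 1 (n + 1)) hi
  rw [hrow, List.map_const', List.sum_replicate, smul_eq_mul]
  rcases Nat.eq_zero_or_pos l.length with h0 | h0
  · simp [h0]
  · push_cast [Nat.cast_sub h0]
    ring

-- ===== VERDICT (by name: the statement is the Claim_ definition above) =====
theorem solution_spec : Claim_equal_solution := by
  intro n _
  unfold Spec_solution solution_alt
  rw [pv_solution_closed, PySem.List.length_pyRange_one]
  have h : ((n + 1 - 1).toNat : Int) = if n > 0 then n else 0 := by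
    split <;> omega
  rw [h]
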